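-- pv_equiv track=rewrite | github.com/dehiska/traffic-project-2 | organize_data.py | is_data_folder
-- ===== SOURCE A (Python) =====
-- MONTH_ABBR = [
--     "jan", "feb", "mar", "apr", "may", "jun",
--     "jul", "aug", "sep", "oct", "nov", "dec",
-- ]
--
-- MONTH_FULL = [
--     "january", "february", "march", "april", "may", "june",
--     "july", "august", "september", "october", "november", "december",
-- ]
--
-- def is_data_folder(name: str) -> bool:
--     """Return True if the folder name looks like a monthly/yearly data folder."""
--     name_lower = name.lower()
--     for prefix in MONTH_ABBR + MONTH_FULL:
--         if name_lower.startswith(prefix + "_"):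
--             return True
--     if len(name_lower) >= 4 and name_lower[:4].isdigit() and "station_data" in name_lower:
--         return True
--     return False
-- ===== SOURCE B (Python) =====
-- MONTH_ABBR = [
--     "jan", "feb", "mar", "apr", "may", "jun",
--     "jul", "aug", "sep", "oct", "nov", "dec",
-- ]
--
-- MONTH_FULL = [
--     "january", "february", "march", "april", "may", "june",
--     "july", "august", "september", "october", "november", "december",
-- ]
--
--
-- def _build_trie():
--     root = {}
--     for m in MONTH_ABBR + MONTH_FULL:
--         node = root
--         for ch in m + "_":
--             node = node.setdefault(ch, {})
--     return root
--
--
-- _TRIE = _build_trie()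
--
--
-- def is_data_folder(name: str) -> bool:
--     """Return True if the folder name looks like a monthly/yearly data folder."""
--     name_lower = name.lower()
--     node = _TRIE
--     for ch in name_lower:
--         nxt = node.get(ch)
--         if nxt is None:
--             break
--         if ch == "_":
--             # '_' edges exist only after a complete month name
--             return True
--         node = nxt
--     return len(name_lower) >= 4 and name_lower[:4].isdigit() and "station_data" in name_lower
-- ===== Notes on version B (the rewrite author's own statement) =====
-- stated objective: alternative
-- what changed: The 24-prefix startswith loop is replaced by a precomputed trie of the month names (nested dicts) walked in a single left-to-right character scan of the name, accepting on the terminal underscore edge; the year/station-data branch is unchanged.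
import Mathlib
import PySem

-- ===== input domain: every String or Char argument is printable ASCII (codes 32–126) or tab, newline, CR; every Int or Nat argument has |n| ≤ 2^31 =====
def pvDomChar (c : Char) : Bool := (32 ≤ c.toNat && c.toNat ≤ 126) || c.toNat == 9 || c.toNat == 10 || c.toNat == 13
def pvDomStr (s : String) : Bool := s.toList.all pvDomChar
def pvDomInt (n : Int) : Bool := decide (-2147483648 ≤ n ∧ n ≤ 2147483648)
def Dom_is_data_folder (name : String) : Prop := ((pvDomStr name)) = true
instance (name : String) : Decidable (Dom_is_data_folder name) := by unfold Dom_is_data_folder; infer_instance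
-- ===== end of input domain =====

-- B replaces A's 24-prefix startswith loop by one precomputed trie of the month names,
-- walked in a single left-to-right character scan (alternative decomposition, same cost class).

-- ===== PORT A =====
def MONTH_ABBR : List String := [
  "jan", "feb", "mar", "apr", "may", "jun",
  "jul", "aug", "sep", "oct", "nov", "dec"]

def MONTH_FULL : List String := [
  "january", "february", "march", "april", "may", "june",
  "july", "august", "september", "october", "november", "december"]

-- the early-return 'for prefix in …' loop is List.any
def is_data_folder (name : String) : Bool :=
  let name_lower := PySem.Str.lower name
  if (MONTH_ABBR ++ MONTH_FULL).any (fun pre => PySem.Str.startswith name_lower (pre ++ "_")) then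
    true
  else if decide (4 ≤ PySem.Str.len name_lower)
        && PySem.Str.strIsdigit (PySem.Str.slice name_lower none (some 4))
        && PySem.Str.isIn "station_data" name_lower then
    true
  else false

-- ===== PORT B =====
-- Python B's nested-dict trie, ported first-child/next-sibling (a dict value that is itself a
-- trie cannot be a nested inductive): 'node c child sib' = entry (c → child), 'sib' the later keys.
inductive Trie : Type where
  | nil : Trie
  | node : Char → Trie → Trie → Trie
deriving DecidableEq, Repr

-- node.get(ch): first-match walk along the sibling chain (keys are unique by construction)
def Trie.find? : Trie → Char → Option Trie
  | .nil, _ => none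
  | .node a child sib, c => if a = c then some child else sib.find? c

-- the inner 'for ch in m + "_": node = node.setdefault(ch, {})' loop of _build_trie;
-- a missing key is appended at the end of the sibling chain (dict insertion order)
def Trie.insertWord : Trie → List Char → Trie
  | t, [] => t
  | .nil, c :: w => .node c (Trie.insertWord .nil w) .nil
  | .node a child sib, c :: w =>
      if a = c then .node a (Trie.insertWord child w) sib
      else .node a child (Trie.insertWord sib (c :: w))

-- _TRIE = _build_trie(): the outer 'for m in MONTH_ABBR + MONTH_FULL' loop
def TRIE : Trie :=
  (MONTH_ABBR ++ MONTH_FULL).foldl (fun t m => t.insertWord (m.toList ++ ['_'])) .nil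

-- B's 'for ch in name_lower' loop: stop on a missing edge, accept on a '_' edge
def trieHit : Trie → List Char → Bool
  | _, [] => false
  | t, c :: cs =>
      match t.find? c with
      | none => false
      | some nxt => if c = '_' then true else trieHit nxt cs

def is_data_folder_alt (name : String) : Bool :=
  let name_lower := PySem.Str.lower name
  if trieHit TRIE name_lower.toList then
    true
  else
    decide (4 ≤ PySem.Str.len name_lower)
      && PySem.Str.strIsdigit (PySem.Str.slice name_lower none (some 4))
      && PySem.Str.isIn "station_data" name_lower

-- ===== PRECONDITION & SPEC =====
def Spec_is_data_folder (name : String) (out : Bool) : Prop := out = is_data_folder_alt name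
instance (name : String) (out : Bool) : Decidable (Spec_is_data_folder name out) := by unfold Spec_is_data_folder; infer_instance

-- ===== CLAIM (what is proved, stated in full; the proofs are below) =====
def Claim_equal_is_data_folder : Prop := ∀ (name : String), Dom_is_data_folder name → Spec_is_data_folder name (is_data_folder name)

-- ===== LEMMAS AND PROOFS =====

theorem trie_find?_insertWord (t : Trie) (a c : Char) (w : List Char) :
    (t.insertWord (a :: w)).find? c
      = if a = c then some (((t.find? a).getD .nil).insertWord w) else t.find? c := by
  induction t with
  | nil =>
    by_cases h : a = c <;> simp [Trie.insertWord, Trie.find?, h]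
  | node b child sib ih1 ih2 =>
    by_cases hba : b = a
    · subst hba
      by_cases hbc : b = c
      · subst hbc
        simp [Trie.insertWord, Trie.find?]
      · simp [Trie.insertWord, Trie.find?, hbc]
    · by_cases hbc : b = c
      · subst hbc
        simp [Trie.insertWord, Trie.find?, hba, Ne.symm hba]
      · simp [Trie.insertWord, Trie.find?, hba, hbc, ih2]

theorem trieHit_nil (cs : List Char) : trieHit .nil cs = false := by
  cases cs <;> simp [trieHit, Trie.find?]

theorem trieHit_insertWord (cs : List Char) (t : Trie) (u : List Char) (hu : '_' ∉ u) :
    trieHit (t.insertWord (u ++ ['_'])) cs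
      = (PySem.Chars.startswith cs (u ++ ['_']) || trieHit t cs) := by
  induction cs generalizing t u with
  | nil =>
    cases h : u ++ ['_'] with
    | nil => exact absurd h (by simp)
    | cons x xs => simp [trieHit, PySem.Chars.startswith, List.isPrefixOf]
  | cons c cs' ih =>
    cases u with
    | nil =>
      by_cases hc : c = '_'
      · subst hc
        cases hf : t.find? '_' <;>
          simp [trieHit, trie_find?_insertWord, hf, PySem.Chars.startswith, List.isPrefixOf]
      · have hc' : ¬ ('_' = c) := fun h => hc h.symm
        cases hf : t.find? c <;>
          simp [trieHit, trie_find?_insertWord, hf, hc, hc',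
                PySem.Chars.startswith, List.isPrefixOf]
    | cons a u' =>
      have ha : a ≠ '_' := fun h => hu (h ▸ List.mem_cons_self)
      have hu' : '_' ∉ u' := fun h => hu (List.mem_cons_of_mem _ h)
      have hsw : ∀ ds : List Char, PySem.Chars.startswith (c :: cs') (a :: ds)
          = ((a == c) && PySem.Chars.startswith cs' ds) := fun ds => rfl
      by_cases hac : a = c
      · subst hac
        cases hf : t.find? a <;>
          simp [trieHit, trie_find?_insertWord, hf, ha, hsw, ih _ _ hu', trieHit_nil]
      · cases hf : t.find? c <;>
          simp [trieHit, trie_find?_insertWord, hf, hac, hsw]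

theorem trieHit_build (ms : List String) (t : Trie) (h : ∀ m ∈ ms, '_' ∉ m.toList) (cs : List Char) :
    trieHit (ms.foldl (fun t m => t.insertWord (m.toList ++ ['_'])) t) cs
      = (ms.any (fun m => PySem.Chars.startswith cs (m.toList ++ ['_'])) || trieHit t cs) := by
  induction ms generalizing t with
  | nil => simp
  | cons m ms' ih =>
    simp only [List.foldl_cons, List.any_cons]
    rw [ih _ (fun x hx => h x (List.mem_cons_of_mem _ hx)),
        trieHit_insertWord _ _ _ (h m List.mem_cons_self)]
    cases PySem.Chars.startswith cs (m.toList ++ ['_']) <;>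
      cases ms'.any (fun m => PySem.Chars.startswith cs (m.toList ++ ['_'])) <;> simp

theorem month_loop_eq_trieHit (nl : String) :
    (MONTH_ABBR ++ MONTH_FULL).any (fun pre => PySem.Str.startswith nl (pre ++ "_"))
      = trieHit TRIE nl.toList := by
  have step : ∀ pre : String,
      PySem.Str.startswith nl (pre ++ "_")
        = PySem.Chars.startswith nl.toList (pre.toList ++ ['_']) := by
    intro pre
    simp [PySem.Str.startswith]
  rw [List.any_congr rfl step, TRIE, trieHit_build _ _ (by decide), trieHit_nil, Bool.or_false]

-- ===== VERDICT (by name: the statement is the Claim_ definition above) =====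
theorem is_data_folder_spec : Claim_equal_is_data_folder := by
  intro name _
  unfold Spec_is_data_folder is_data_folder is_data_folder_alt
  simp only [month_loop_eq_trieHit]
  cases trieHit TRIE (PySem.Str.lower name).toList <;> simp
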